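-- pv_equiv track=rewrite | github.com/liahaller/claeli | funcoes.py | calcula_pontos_sequencia_alta
-- ===== SOURCE A (Python) =====
-- def calcula_pontos_sequencia_alta(dados):
--     j = 1
--     dados = sorted(dados)
--     lista=[]
--     for i in range(len(dados)):
--         if dados[i] not in lista:
--             lista.append(dados[i])
--     for i in range(len(lista)-1):
--         if lista[i]+1 in lista:
--             j += 1
--         if j >= 5:
--             break
--         if lista[i]+1 not in lista:
--             j = 1
--     if j >= 5:
--         return 30
--     else:
--         return 0
-- ===== SOURCE B (Python) =====
-- def calcula_pontos_sequencia_alta(dados):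
--     s = set(dados)
--     if any(x - 1 not in s
--            and x + 1 in s and x + 2 in s and x + 3 in s and x + 4 in s
--            for x in s):
--         return 30
--     return 0
-- ===== Notes on version B (the rewrite author's own statement) =====
-- stated objective: faster
-- what changed: Instead of sorting, deduplicating with quadratic list membership and scanning adjacent pairs with a counter, B builds one hash set and checks in a single pass whether some run-start x (x-1 absent) has x+1..x+4 all present.
import Mathlib
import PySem

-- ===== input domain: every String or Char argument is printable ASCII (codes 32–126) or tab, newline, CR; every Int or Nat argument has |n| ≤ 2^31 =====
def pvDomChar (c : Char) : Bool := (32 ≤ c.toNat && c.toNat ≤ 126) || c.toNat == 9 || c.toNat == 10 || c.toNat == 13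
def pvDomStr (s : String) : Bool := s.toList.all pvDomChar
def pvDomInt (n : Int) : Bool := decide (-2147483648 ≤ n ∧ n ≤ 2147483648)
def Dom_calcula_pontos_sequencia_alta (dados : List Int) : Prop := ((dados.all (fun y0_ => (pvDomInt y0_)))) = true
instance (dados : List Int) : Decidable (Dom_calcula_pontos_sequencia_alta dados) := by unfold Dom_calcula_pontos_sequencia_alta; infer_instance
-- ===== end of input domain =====

-- B replaces A's sort + quadratic dedup + counter scan by one hash set and a
-- single run-start check (x-1 absent, x+1..x+4 present); return value only.

-- ===== PORT A =====
-- the second Python loop (over i in range(len(lista)-1), with its break)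
def calcula_pontos_sequencia_alta_loop (lista : List Int) (i : Nat) (j : Int) : Int :=
  if _h : i < lista.length - 1 then
    let j1 := if lista.contains (PySem.List.pyGetD lista (i : Int) 0 + 1) then j + 1 else j
    if j1 ≥ 5 then j1
    else
      let j2 := if ¬ lista.contains (PySem.List.pyGetD lista (i : Int) 0 + 1) then 1 else j1
      calcula_pontos_sequencia_alta_loop lista (i + 1) j2
  else j
termination_by lista.length - 1 - i

def calcula_pontos_sequencia_alta (dados : List Int) : Int :=
  let dados2 := PySem.List.sorted dados (fun x => x) false
  let lista := (PySem.List.pyRange 0 (dados2.length : Int) 1).foldl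
      (fun lista i =>
        if lista.contains (PySem.List.pyGetD dados2 i 0) then lista
        else lista ++ [PySem.List.pyGetD dados2 i 0]) []
  let j := calcula_pontos_sequencia_alta_loop lista 0 1
  if j ≥ 5 then 30 else 0

-- ===== PORT B =====
def calcula_pontos_sequencia_alta_alt (dados : List Int) : Int :=
  let s : PySem.Set Int := PySem.Set.ofList dados
  if s.any (fun x => !(PySem.Set.contains s (x - 1))
      && PySem.Set.contains s (x + 1) && PySem.Set.contains s (x + 2)
      && PySem.Set.contains s (x + 3) && PySem.Set.contains s (x + 4)) then 30
  else 0

-- ===== PRECONDITION & SPEC =====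
def Spec_calcula_pontos_sequencia_alta (dados : List Int) (out : Int) : Prop := out = calcula_pontos_sequencia_alta_alt dados
instance (dados : List Int) (out : Int) : Decidable (Spec_calcula_pontos_sequencia_alta dados out) := by unfold Spec_calcula_pontos_sequencia_alta; infer_instance

-- ===== CLAIM (what is proved, stated in full; the proofs are below) =====
def Claim_equal_calcula_pontos_sequencia_alta : Prop := ∀ (dados : List Int), Dom_calcula_pontos_sequencia_alta dados → Spec_calcula_pontos_sequencia_alta dados (calcula_pontos_sequencia_alta dados)

-- ===== LEMMAS AND PROOFS =====

-- "some 5 consecutive values occur in l"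
def pvHasRun (l : List Int) : Prop :=
  ∃ x ∈ l, x + 1 ∈ l ∧ x + 2 ∈ l ∧ x + 3 ∈ l ∧ x + 4 ∈ l

-- k consecutive iterations of A's scan loop, starting at index a, all increment j
def pvPrefRun (l : List Int) (a k : Nat) : Prop :=
  a + k ≤ l.length - 1 ∧ ∀ m < k, l.getD (a + m) 0 + 1 ∈ l

lemma pvHasRun_congr (l l' : List Int) (h : ∀ y, y ∈ l ↔ y ∈ l') :
    pvHasRun l ↔ pvHasRun l' := by
  unfold pvHasRun
  simp only [h]

lemma pvPrefRun_mono (l : List Int) (a : Nat) {k k' : Nat} (h : k' ≤ k)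
    (hp : pvPrefRun l a k) : pvPrefRun l a k' :=
  ⟨by have := hp.1; omega, fun m hm => hp.2 m (by omega)⟩

lemma pvLoop_ge5 (l : List Int) : ∀ n i (j : Int), n = l.length - 1 - i → 1 ≤ j → j < 5 →
    (5 ≤ calcula_pontos_sequencia_alta_loop l i j ↔
      (∃ k : Nat, pvPrefRun l i k ∧ 5 ≤ j + k) ∨ ∃ a, i < a ∧ pvPrefRun l a 4) := by
  intro n
  induction n with
  | zero =>
    intro i j hn h1 h5
    have hi : l.length - 1 ≤ i := by omega
    rw [calcula_pontos_sequencia_alta_loop, dif_neg (by omega)]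
    constructor
    · intro h; omega
    · rintro (⟨k, ⟨hk1, _⟩, hk2⟩ | ⟨a, hia, ⟨ha1, _⟩⟩) <;> omega
  | succ n ih =>
    intro i j hn h1 h5
    have hi : i < l.length - 1 := by omega
    rw [calcula_pontos_sequencia_alta_loop, dif_pos hi]
    simp only [PySem.List.pyGetD_natCast, List.contains_iff_mem]
    by_cases hm : l.getD i 0 + 1 ∈ l
    · rw [if_pos hm, if_neg (show ¬ (l.getD i 0 + 1 ∉ l) from fun h => h hm)]
      by_cases h4 : j + 1 ≥ 5
      · rw [if_pos h4]
        constructor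
        · intro _
          exact Or.inl ⟨1, ⟨by omega, fun m hm' => by
            have : m = 0 := by omega
            subst this; simpa using hm⟩, by omega⟩
        · intro _; exact h4
      · rw [if_neg h4]
        rw [ih (i+1) (j+1) (by omega) (by omega) (by omega)]
        constructor
        · rintro (⟨k, hk, hk5⟩ | ⟨a, hia, hpa⟩)
          · refine Or.inl ⟨k + 1, ⟨by have := hk.1; omega, fun m hm' => ?_⟩, by omega⟩
            rcases Nat.eq_zero_or_pos m with rfl | hpos
            · simpa using hm
            · have e : i + m = i + 1 + (m - 1) := by omega
              rw [e]; exact hk.2 (m - 1) (by omega)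
          · exact Or.inr ⟨a, by omega, hpa⟩
        · rintro (⟨k, hk, hk5⟩ | ⟨a, hia, hpa⟩)
          · rcases Nat.eq_zero_or_pos k with rfl | hpos
            · exact absurd (by omega : (5:Int) ≤ j) (by omega)
            · refine Or.inl ⟨k - 1, ⟨by have := hk.1; omega, fun m hm' => ?_⟩, by omega⟩
              have e : i + 1 + m = i + (m + 1) := by omega
              rw [e]; exact hk.2 (m + 1) (by omega)
          · rcases Nat.lt_or_ge (i+1) a with hgt | hle
            · exact Or.inr ⟨a, hgt, hpa⟩
            · have : a = i + 1 := by omega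
              subst this
              exact Or.inl ⟨4, hpa, by omega⟩
    · rw [if_neg hm, if_neg (show ¬ (j ≥ 5) by omega), if_pos hm]
      rw [ih (i+1) 1 (by omega) (by omega) (by omega)]
      constructor
      · rintro (⟨k, hk, hk5⟩ | ⟨a, hia, hpa⟩)
        · exact Or.inr ⟨i + 1, by omega, pvPrefRun_mono l (i+1) (by omega : 4 ≤ k) hk⟩
        · exact Or.inr ⟨a, by omega, hpa⟩
      · rintro (⟨k, hk, hk5⟩ | ⟨a, hia, hpa⟩)
        · rcases Nat.eq_zero_or_pos k with rfl | hpos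
          · exact absurd (by omega : (5:Int) ≤ j) (by omega)
          · exact absurd (by simpa using hk.2 0 hpos) hm
        · rcases Nat.lt_or_ge (i+1) a with hgt | hle
          · exact Or.inr ⟨a, hgt, hpa⟩
          · have : a = i + 1 := by omega
            subst this
            exact Or.inl ⟨4, hpa, by omega⟩

lemma pvA_ge5_iff (l : List Int) :
    5 ≤ calcula_pontos_sequencia_alta_loop l 0 1 ↔ ∃ a, pvPrefRun l a 4 := by
  rw [pvLoop_ge5 l (l.length - 1 - 0) 0 1 rfl (by omega) (by omega)]
  constructor
  · rintro (⟨k, hk, hk5⟩ | ⟨a, _, hpa⟩)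
    · exact ⟨0, pvPrefRun_mono l 0 (by omega : 4 ≤ k) hk⟩
    · exact ⟨a, hpa⟩
  · rintro ⟨a, hpa⟩
    rcases Nat.eq_zero_or_pos a with rfl | hpos
    · exact Or.inl ⟨4, hpa, by omega⟩
    · exact Or.inr ⟨a, hpos, hpa⟩

lemma pvSucc (l : List Int) (hl : l.Pairwise (· < ·)) (i : Nat) (hi : i < l.length)
    (h : l.getD i 0 + 1 ∈ l) : i + 1 < l.length ∧ l.getD (i + 1) 0 = l.getD i 0 + 1 := by
  have mono := List.pairwise_iff_getElem.1 hl
  obtain ⟨t, ht, hte⟩ := List.mem_iff_getElem.mp h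
  rw [List.getD_eq_getElem l 0 hi] at hte
  have hti : i < t := by
    by_contra hc
    rcases Nat.lt_or_ge t i with hlt | hge
    · have := mono t i ht hi hlt; omega
    · have : t = i := by omega
      subst this; omega
  have h1 : i + 1 < l.length := by omega
  refine ⟨h1, ?_⟩
  rw [List.getD_eq_getElem l 0 h1, List.getD_eq_getElem l 0 hi]
  have hle : l[i] < l[i+1] := mono i (i+1) hi h1 (by omega)
  rcases Nat.eq_or_lt_of_le (show i + 1 ≤ t by omega) with rfl | hlt2
  · omega
  · have := mono (i+1) t h1 ht hlt2; omega

lemma pvPrefRun_iff_hasRun (l : List Int) (hl : l.Pairwise (· < ·)) :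
    (∃ a, pvPrefRun l a 4) ↔ pvHasRun l := by
  constructor
  · rintro ⟨a, hlen, hstep⟩
    have ha : a < l.length := by omega
    have s0 := hstep 0 (by omega)
    have c1 := pvSucc l hl a ha s0
    have s1 := hstep 1 (by omega)
    have c2 := pvSucc l hl (a+1) c1.1 (by simpa using s1)
    have s2 := hstep 2 (by omega)
    have c3 := pvSucc l hl (a+2) c2.1 (by simpa using s2)
    have s3 := hstep 3 (by omega)
    refine ⟨l.getD a 0, by rw [List.getD_eq_getElem l 0 ha]; exact List.getElem_mem ha, ?_, ?_, ?_, ?_⟩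
    · simpa using s0
    · have := s1
      rw [c1.2] at this; simpa [add_assoc] using this
    · have := s2
      rw [show a + 2 = (a+1)+1 from rfl, c2.2, c1.2] at this
      simpa [add_assoc] using this
    · have := s3
      rw [show a + 3 = (a+2)+1 from rfl, c3.2, c2.2, c1.2] at this
      simpa [add_assoc] using this
  · rintro ⟨x, hx, h1, h2, h3, h4⟩
    obtain ⟨a, ha, hxa⟩ := List.mem_iff_getElem.mp hx
    have g0 : l.getD a 0 = x := by rw [List.getD_eq_getElem l 0 ha]; exact hxa
    have c1 := pvSucc l hl a ha (by rw [g0]; exact h1)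
    have g1 : l.getD (a+1) 0 = x + 1 := by rw [c1.2, g0]
    have c2 := pvSucc l hl (a+1) c1.1 (by rw [g1, show x+1+1 = x+2 by ring]; exact h2)
    have g2 : l.getD (a+2) 0 = x + 2 := by
      rw [show a+2 = (a+1)+1 from rfl, c2.2, g1]; ring
    have c3 := pvSucc l hl (a+2) c2.1 (by rw [g2, show x+2+1 = x+3 by ring]; exact h3)
    have g3 : l.getD (a+3) 0 = x + 3 := by
      rw [show a+3 = (a+2)+1 from rfl, c3.2, g2]; ring
    have c4 := pvSucc l hl (a+3) c3.1 (by rw [g3, show x+3+1 = x+4 by ring]; exact h4)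
    refine ⟨a, by omega, ?_⟩
    intro m hm
    interval_cases m
    · rw [show a+0 = a from rfl, g0]; exact h1
    · rw [show a+1 = a+1 from rfl, g1, show x+1+1 = x+2 by ring]; exact h2
    · rw [g2, show x+2+1 = x+3 by ring]; exact h3
    · rw [g3, show x+3+1 = x+4 by ring]; exact h4

lemma pvOfList_pairwise_lt (l : List Int) (hl : l.Pairwise (· ≤ ·)) :
    (PySem.Set.ofList l : List Int).Pairwise (· < ·) := by
  induction l with
  | nil => simp [PySem.Set.ofList]
  | cons x xs ih =>
    rw [List.pairwise_cons] at hl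
    rw [PySem.Set.ofList_cons, List.pairwise_cons]
    constructor
    · intro y hy
      rw [PySem.Set.mem_discard] at hy
      have hyx : y ∈ xs := (PySem.Set.mem_ofList xs y).1 hy.1
      have := hl.1 y hyx
      omega
    · exact (List.Pairwise.sublist (by simp [PySem.Set.discard]) (ih hl.2))

lemma pvExists_start (L : List Int) : ∀ n : Nat, ∀ x : Int,
    L.countP (fun y => decide (y < x)) = n → x ∈ L →
    (x + 1 ∈ L ∧ x + 2 ∈ L ∧ x + 3 ∈ L ∧ x + 4 ∈ L) →
    ∃ y ∈ L, (y - 1) ∉ L ∧ y + 1 ∈ L ∧ y + 2 ∈ L ∧ y + 3 ∈ L ∧ y + 4 ∈ L := by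
  intro n
  induction n using Nat.strong_induction_on with
  | _ n ih =>
    intro x hc hx hrun
    by_cases hprev : (x - 1) ∈ L
    · have hlt : L.countP (fun y => decide (y < x - 1)) < n := by
        subst hc
        obtain ⟨l₁, l₂, rfl⟩ := List.append_of_mem hprev
        have h1 := List.countP_mono_left (l := l₁)
          (p := fun y => decide (y < x - 1)) (q := fun y => decide (y < x))
          (by intro a _ h; simp at h ⊢; omega)
        have h2 := List.countP_mono_left (l := l₂)
          (p := fun y => decide (y < x - 1)) (q := fun y => decide (y < x))
          (by intro a _ h; simp at h ⊢; omega)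
        simp [List.countP_append]
        omega
      have e2 : x - 1 + 2 = x + 1 := by ring
      have e3 : x - 1 + 3 = x + 2 := by ring
      have e4 : x - 1 + 4 = x + 3 := by ring
      exact ih _ hlt (x - 1) rfl hprev
        (by rw [sub_add_cancel, e2, e3, e4]; exact ⟨hx, hrun.1, hrun.2.1, hrun.2.2.1⟩)
    · exact ⟨x, hx, hprev, hrun⟩

lemma pvB_pos (dados : List Int) (h : pvHasRun dados) :
    calcula_pontos_sequencia_alta_alt dados = 30 := by
  unfold calcula_pontos_sequencia_alta_alt
  have hmem : ∀ y : Int, y ∈ (PySem.Set.ofList dados : List Int) ↔ y ∈ dados :=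
    fun y => PySem.Set.mem_ofList dados y
  obtain ⟨x, hx, hrun⟩ := h
  obtain ⟨y, hy, hy1, hr1, hr2, hr3, hr4⟩ := pvExists_start dados _ x rfl hx hrun
  rw [if_pos]
  rw [List.any_eq_true]
  refine ⟨y, (hmem y).2 hy, ?_⟩
  simp only [Bool.and_eq_true, Bool.not_eq_true', PySem.Set.contains_iff]
  refine ⟨⟨⟨⟨?_, (hmem _).2 hr1⟩, (hmem _).2 hr2⟩, (hmem _).2 hr3⟩, (hmem _).2 hr4⟩
  rw [← Bool.not_eq_true, PySem.Set.contains_iff, hmem]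
  exact hy1

lemma pvB_neg (dados : List Int) (h : ¬ pvHasRun dados) :
    calcula_pontos_sequencia_alta_alt dados = 0 := by
  unfold calcula_pontos_sequencia_alta_alt
  have hmem : ∀ y : Int, y ∈ (PySem.Set.ofList dados : List Int) ↔ y ∈ dados :=
    fun y => PySem.Set.mem_ofList dados y
  rw [if_neg]
  rw [List.any_eq_true]
  rintro ⟨y, hy, hp⟩
  simp only [Bool.and_eq_true, PySem.Set.contains_iff] at hp
  rw [hmem] at hy
  exact h ⟨y, hy, (hmem _).1 hp.1.1.1.2, (hmem _).1 hp.1.1.2,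
    (hmem _).1 hp.1.2, (hmem _).1 hp.2⟩

lemma pvA_hasRun_iff (dados : List Int) :
    5 ≤ calcula_pontos_sequencia_alta_loop
        (PySem.Set.ofList (PySem.List.sorted dados (fun x => x) false)) 0 1 ↔
      pvHasRun dados := by
  have hp : (PySem.Set.ofList (PySem.List.sorted dados (fun x => x) false) : List Int).Pairwise (· < ·) :=
    pvOfList_pairwise_lt _ (by simpa using PySem.List.sorted_pairwise dados (fun x => x))
  have hmem : ∀ y : Int,
      y ∈ (PySem.Set.ofList (PySem.List.sorted dados (fun x => x) false) : List Int) ↔ y ∈ dados :=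
    fun y => (PySem.Set.mem_ofList _ y).trans (PySem.List.mem_sorted _ _ _ y)
  rw [pvA_ge5_iff, pvPrefRun_iff_hasRun _ hp, pvHasRun_congr _ _ hmem]

lemma pvA_unfold (dados : List Int) :
    calcula_pontos_sequencia_alta dados =
      if 5 ≤ calcula_pontos_sequencia_alta_loop
          (PySem.Set.ofList (PySem.List.sorted dados (fun x => x) false)) 0 1
      then 30 else 0 := by
  unfold calcula_pontos_sequencia_alta
  show (if calcula_pontos_sequencia_alta_loop
      (List.foldl (fun lista i =>
          if lista.contains (PySem.List.pyGetD (PySem.List.sorted dados (fun x => x) false) i 0) then lista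
          else lista ++ [PySem.List.pyGetD (PySem.List.sorted dados (fun x => x) false) i 0])
        [] (PySem.List.pyRange 0 ((PySem.List.sorted dados (fun x => x) false).length : Int) 1)) 0 1 ≥ 5
    then 30 else 0) = _
  rw [PySem.List.foldl_pyRange_zero_pyGetD' (PySem.List.sorted dados (fun x => x) false) 0
    (fun lista v => if lista.contains v then lista else lista ++ [v]) []]
  rfl

-- ===== VERDICT (by name: the statement is the Claim_ definition above) =====
theorem calcula_pontos_sequencia_alta_spec : Claim_equal_calcula_pontos_sequencia_alta := by
  intro dados _
  unfold Spec_calcula_pontos_sequencia_alta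
  rw [pvA_unfold]
  by_cases h : pvHasRun dados
  · rw [if_pos ((pvA_hasRun_iff dados).2 h), pvB_pos dados h]
  · rw [if_neg (fun hge => h ((pvA_hasRun_iff dados).1 hge)), pvB_neg dados h]
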